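-- pv_equiv track=rewrite | github.com/FranciscoMorenoB/TFG-XAI-CONCURRENCIA | evaluate.py | get_count_cases
-- ===== SOURCE A (Python) =====
-- f2_cases = ['wu', 'uw', 'w', 'noop']
--
-- f3_cases = ['dr', 'cr', 'r', 'noop']
--
-- def get_count_cases(samples_list):
--
--     cases_dict = dict.fromkeys([f3 + '_' + f2 for f3 in f3_cases for f2 in f2_cases], 0)
--
--     def fill_f2_pattern(cases_dict, f3, sample):
--         if sample[1].find('w') != -1 and sample[1].find('u') != -1:
--             if sample[1].index('w') < sample[1].index('u'):
--                 cases_dict[f3 + 'wu'] += 1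
--             else:
--                 cases_dict[f3 + 'uw'] += 1
--         elif sample[1].find('w') != -1:
--             cases_dict[f3 + 'w'] += 1
--         else:
--             cases_dict[f3 + 'noop'] += 1
--
--     for i in range(len(samples_list)):
--         if samples_list[i][2].find('d') != -1 and samples_list[i][2].find('r') != -1:
--             fill_f2_pattern(cases_dict, 'dr_', samples_list[i])
--         elif samples_list[i][2].find('c') != -1 and samples_list[i][2].find('r') != -1:
--             fill_f2_pattern(cases_dict, 'cr_', samples_list[i])
--         elif samples_list[i][2].find('r') != -1:
--             fill_f2_pattern(cases_dict, 'r_', samples_list[i])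
--         else:
--             fill_f2_pattern(cases_dict, 'noop_', samples_list[i])
--
--     return cases_dict
-- ===== SOURCE B (Python) =====
-- f2_cases = ['wu', 'uw', 'w', 'noop']
--
-- f3_cases = ['dr', 'cr', 'r', 'noop']
--
-- def get_count_cases(samples_list):
--     counts = [0] * 16
--     for x in samples_list:
--         cs = set(x[2])
--         i = 3 if 'r' not in cs else (0 if 'd' in cs else (1 if 'c' in cs else 2))
--         # single left-to-right scan of x[1]: the second relevant letter seen
--         # decides the order; falling off the end means at most one was present
--         w = u = False
--         j = None
--         for c in x[1]:
--             if c == 'w':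
--                 if u:
--                     j = 1  # 'uw'
--                     break
--                 w = True
--             elif c == 'u':
--                 if w:
--                     j = 0  # 'wu'
--                     break
--                 u = True
--         if j is None:
--             j = 2 if w else 3
--         counts[4 * i + j] += 1
--     return {f3 + '_' + f2: counts[4 * a + b]
--             for a, f3 in enumerate(f3_cases) for b, f2 in enumerate(f2_cases)}
-- ===== Notes on version B (the rewrite author's own statement) =====
-- stated objective: alternative
-- what changed: Replaces the find/index-based cascaded branching that mutates a pre-built counter dict with a flat 16-slot count array indexed arithmetically (4*i+j) where i comes from a character-set membership test of x[2] and j from a single left-to-right scan of x[1] that stops at the second relevant letter, the dict being assembled once at the end from the array.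
import Mathlib
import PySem

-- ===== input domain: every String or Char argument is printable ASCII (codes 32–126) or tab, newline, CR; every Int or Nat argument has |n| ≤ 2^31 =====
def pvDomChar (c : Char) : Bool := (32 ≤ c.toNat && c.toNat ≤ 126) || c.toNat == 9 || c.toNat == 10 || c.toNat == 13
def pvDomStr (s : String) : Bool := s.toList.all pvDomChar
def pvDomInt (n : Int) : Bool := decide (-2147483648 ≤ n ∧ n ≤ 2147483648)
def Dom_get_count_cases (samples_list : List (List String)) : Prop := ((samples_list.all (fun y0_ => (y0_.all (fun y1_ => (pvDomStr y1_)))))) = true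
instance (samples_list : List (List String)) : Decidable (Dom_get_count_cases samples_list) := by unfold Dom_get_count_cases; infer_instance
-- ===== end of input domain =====

-- B replaces A's find/index cascade that mutates a pre-built counter dict by a flat
-- 16-slot count array indexed arithmetically (4*i+j): i from a character-set
-- membership test of x[2], j from a single left-to-right scan of x[1] stopping at
-- the second relevant letter; the dict is assembled once at the end.

-- module constants (shared by both Pythons)
def pv_f2_cases : List String := ["wu", "uw", "w", "noop"]
def pv_f3_cases : List String := ["dr", "cr", "r", "noop"]

-- ===== PORT A =====
-- inner helper fill_f2_pattern; 'cases_dict[k] += 1' is ported as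
-- d.insert k (d.getD k 0 + 1): the key is always one of the 16 pre-filled keys, where
-- Python's d[k] += 1 computes exactly this.  sample[1].index('w') is ported as
-- PySem.Str.find: both substrings are present on this branch, where index = find.
def pvA_fill_f2_pattern (cases_dict : PySem.Dict String Int) (f3 : String) (sample : List String) :
    PySem.Dict String Int :=
  let s1 := PySem.List.pyGetD sample 1 ""   -- in range by Pre_
  if PySem.Str.find s1 "w" ≠ -1 ∧ PySem.Str.find s1 "u" ≠ -1 then
    if PySem.Str.find s1 "w" < PySem.Str.find s1 "u" then
      cases_dict.insert (f3 ++ "wu") (cases_dict.getD (f3 ++ "wu") 0 + 1)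
    else
      cases_dict.insert (f3 ++ "uw") (cases_dict.getD (f3 ++ "uw") 0 + 1)
  else if PySem.Str.find s1 "w" ≠ -1 then
    cases_dict.insert (f3 ++ "w") (cases_dict.getD (f3 ++ "w") 0 + 1)
  else
    cases_dict.insert (f3 ++ "noop") (cases_dict.getD (f3 ++ "noop") 0 + 1)

-- the loop 'for i in range(len(samples_list))', reading samples_list[i] at each use
def get_count_cases (samples_list : List (List String)) : List (String × Int) :=
  (List.foldl
    (fun d i =>
      if PySem.Str.find (PySem.List.pyGetD (PySem.List.pyGetD samples_list i []) 2 "") "d" ≠ -1 ∧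
         PySem.Str.find (PySem.List.pyGetD (PySem.List.pyGetD samples_list i []) 2 "") "r" ≠ -1 then
        pvA_fill_f2_pattern d "dr_" (PySem.List.pyGetD samples_list i [])
      else if PySem.Str.find (PySem.List.pyGetD (PySem.List.pyGetD samples_list i []) 2 "") "c" ≠ -1 ∧
              PySem.Str.find (PySem.List.pyGetD (PySem.List.pyGetD samples_list i []) 2 "") "r" ≠ -1 then
        pvA_fill_f2_pattern d "cr_" (PySem.List.pyGetD samples_list i [])
      else if PySem.Str.find (PySem.List.pyGetD (PySem.List.pyGetD samples_list i []) 2 "") "r" ≠ -1 then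
        pvA_fill_f2_pattern d "r_" (PySem.List.pyGetD samples_list i [])
      else pvA_fill_f2_pattern d "noop_" (PySem.List.pyGetD samples_list i []))
    (PySem.Dict.ofList
      ((pv_f3_cases.flatMap (fun f3 => pv_f2_cases.map (fun f2 => f3 ++ "_" ++ f2))).map
        (fun k => (k, (0 : Int)))))
    (PySem.List.pyRange 0 (PySem.List.len samples_list) 1)).items

-- ===== PORT B =====
-- i = 3 if 'r' not in cs else (0 if 'd' in cs else (1 if 'c' in cs else 2))  with cs = set(x[2])
def pvIdxF3 (s : String) : Nat :=
  let cs := PySem.Set.ofList s.toList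
  if ¬ (PySem.Set.contains cs 'r' = true) then 3
  else if PySem.Set.contains cs 'd' = true then 0
  else if PySem.Set.contains cs 'c' = true then 1
  else 2

-- the 'for c in x[1]' scan with its break/else: state (w, u), result j
def pvScanF2 : List Char → Bool → Bool → Nat
  | [], w, _ => if w then 2 else 3
  | c :: rest, w, u =>
    if c = 'w' then (if u then 1 else pvScanF2 rest true u)
    else if c = 'u' then (if w then 0 else pvScanF2 rest w true)
    else pvScanF2 rest w u

-- the per-sample body computing counts index 4*i+j
def pvSampleIdx (x : List String) : Nat :=
  4 * pvIdxF3 (PySem.List.pyGetD x 2 "") + pvScanF2 (PySem.List.pyGetD x 1 "").toList false false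

-- counts[4*i+j] += 1
def pvB_step (cs : List Int) (x : List String) : List Int :=
  PySem.List.pySetD cs (pvSampleIdx x : Int)
    (PySem.List.pyGetD cs (pvSampleIdx x : Int) 0 + 1)

def get_count_cases_alt (samples_list : List (List String)) : List (String × Int) :=
  let counts := samples_list.foldl pvB_step (List.replicate 16 (0 : Int))
  (PySem.List.enumerate pv_f3_cases).flatMap (fun a =>
    (PySem.List.enumerate pv_f2_cases).map (fun b =>
      (a.2 ++ "_" ++ b.2, PySem.List.pyGetD counts (4 * a.1 + b.1) 0)))

-- ===== PRECONDITION & SPEC =====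
-- Pre_ excludes exactly the inputs where the Python A raises IndexError: a sample
-- shorter than 3 elements (A reads sample[1] and sample[2]); B raises there too.
def Pre_get_count_cases (samples_list : List (List String)) : Prop :=
  ∀ x ∈ samples_list, 3 ≤ x.length
instance (samples_list : List (List String)) : Decidable (Pre_get_count_cases samples_list) := by
  unfold Pre_get_count_cases; infer_instance

def pvWitness_get_count_cases : List (List String) := [["a", "wu", "dr"], ["b", "", "xr"]]

def Spec_get_count_cases (samples_list : List (List String)) (out : List (String × Int)) : Prop := out = get_count_cases_alt samples_list
instance (samples_list : List (List String)) (out : List (String × Int)) : Decidable (Spec_get_count_cases samples_list out) := by unfold Spec_get_count_cases; infer_instance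

-- ===== CLAIM (what is proved, stated in full; the proofs are below) =====
def Claim_equal_get_count_cases : Prop := ∀ (samples_list : List (List String)), Dom_get_count_cases samples_list → Pre_get_count_cases samples_list → Spec_get_count_cases samples_list (get_count_cases samples_list)

-- ===== LEMMAS AND PROOFS =====

-- the key A assigns to a sample (A's branch cascade, written as one expression)
def pvKey (x : List String) : String :=
  (let s2 := (PySem.List.pyGetD x 2 "").toList
   if 'd' ∈ s2 ∧ 'r' ∈ s2 then "dr_" else if 'c' ∈ s2 ∧ 'r' ∈ s2 then "cr_"
   else if 'r' ∈ s2 then "r_" else "noop_") ++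
  (let s1 := (PySem.List.pyGetD x 1 "").toList
   if 'w' ∈ s1 ∧ 'u' ∈ s1 then
     (if PySem.Chars.find s1 ['w'] < PySem.Chars.find s1 ['u'] then "wu" else "uw")
   else if 'w' ∈ s1 then "w" else "noop")

-- the 16 keys, in insertion order
def pvAllKeys : List String :=
  ["dr_wu", "dr_uw", "dr_w", "dr_noop", "cr_wu", "cr_uw", "cr_w", "cr_noop",
   "r_wu", "r_uw", "r_w", "r_noop", "noop_wu", "noop_uw", "noop_w", "noop_noop"]

lemma pvSingleton_infix_iff (a : Char) (l : List Char) : [a] <:+: l ↔ a ∈ l := by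
  constructor
  · intro h; exact h.sublist.subset (List.mem_singleton_self a)
  · intro h
    obtain ⟨s, t, rfl⟩ := List.append_of_mem h
    exact ⟨s, t, by simp⟩

lemma pvFind_mem_iff (a : Char) (l : List Char) :
    PySem.Chars.find l [a] ≠ -1 ↔ a ∈ l := by
  rw [PySem.Chars.find_ne_neg_one_iff, pvSingleton_infix_iff]

lemma pvSingleton_prefix_drop_iff (a : Char) (l : List Char) (i : Nat) :
    [a] <+: l.drop i ↔ l[i]? = some a := by
  constructor
  · rintro ⟨t, ht⟩
    have : (l.drop i)[0]? = some a := by rw [← ht]; rfl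
    simpa [List.getElem?_drop] using this
  · intro h
    refine ⟨(l.drop i).tail, ?_⟩
    have h0 : (l.drop i)[0]? = some a := by simpa [List.getElem?_drop] using h
    cases hd : l.drop i with
    | nil => simp [hd] at h0
    | cons y ys => simp [hd] at h0 ⊢; simp [h0]

lemma pvFind_cons (a c : Char) (l : List Char) :
    PySem.Chars.find (c :: l) [a] =
      if a = c then 0 else if a ∈ l then PySem.Chars.find l [a] + 1 else -1 := by
  by_cases hac : a = c
  · subst hac
    have hmem : [a] <:+: (a :: l) := (pvSingleton_infix_iff a (a :: l)).2 List.mem_cons_self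
    have h0 : 0 ≤ PySem.Chars.find (a :: l) [a] := (PySem.Chars.find_nonneg_iff _ _).2 hmem
    obtain ⟨hpre, hmin⟩ := PySem.Chars.find_spec h0
    have hz : (PySem.Chars.find (a :: l) [a]).toNat = 0 := by
      by_contra hne
      exact hmin 0 (Nat.pos_of_ne_zero hne)
        ((pvSingleton_prefix_drop_iff a (a :: l) 0).2 (by simp))
    rw [← Int.toNat_of_nonneg h0, hz]; simp
  · rw [if_neg hac]
    by_cases hal : a ∈ l
    · rw [if_pos hal]
      have hmemc : a ∈ c :: l := List.mem_cons_of_mem c hal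
      have h0c : 0 ≤ PySem.Chars.find (c :: l) [a] :=
        (PySem.Chars.find_nonneg_iff _ _).2 ((pvSingleton_infix_iff a (c :: l)).2 hmemc)
      have h0l : 0 ≤ PySem.Chars.find l [a] :=
        (PySem.Chars.find_nonneg_iff _ _).2 ((pvSingleton_infix_iff a l).2 hal)
      obtain ⟨hpreC, hminC⟩ := PySem.Chars.find_spec h0c
      obtain ⟨hpreL, hminL⟩ := PySem.Chars.find_spec h0l
      set t := (PySem.Chars.find (c :: l) [a]).toNat with ht
      set n := (PySem.Chars.find l [a]).toNat with hn
      have htpos : 1 ≤ t := by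
        by_contra hlt
        have ht0 : t = 0 := by omega
        rw [ht0] at hpreC
        have : (c :: l)[(0 : Nat)]? = some a :=
          (pvSingleton_prefix_drop_iff a (c :: l) 0).1 hpreC
        simp at this
        exact hac this.symm
      have hle1 : t ≤ n + 1 := by
        by_contra hgt
        exact hminC (n + 1) (by omega) (by rw [List.drop_succ_cons]; exact hpreL)
      have hle2 : n + 1 ≤ t := by
        by_contra hgt
        obtain ⟨m, hm⟩ : ∃ m, t = m + 1 := ⟨t - 1, by omega⟩
        rw [hm, List.drop_succ_cons] at hpreC
        exact hminL m (by omega) hpreC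
      omega
    · rw [if_neg hal]
      have hnot : a ∉ c :: l := by simp [hac, hal]
      by_contra hne
      exact hnot ((pvFind_mem_iff a (c :: l)).1 hne)

-- pvScanF2 characterized (w already seen)
lemma pvScanF2_w (l : List Char) : pvScanF2 l true false = if 'u' ∈ l then 0 else 2 := by
  induction l with
  | nil => simp [pvScanF2]
  | cons c rest ih =>
    by_cases hw : c = 'w'
    · subst hw; simpa [pvScanF2] using ih
    · by_cases hu : c = 'u'
      · subst hu; simp [pvScanF2]
      · have hu' : ('u' : Char) ≠ c := fun h => hu h.symm
        simp [pvScanF2, hw, hu, hu', ih]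

-- pvScanF2 characterized (u already seen)
lemma pvScanF2_u (l : List Char) : pvScanF2 l false true = if 'w' ∈ l then 1 else 3 := by
  induction l with
  | nil => simp [pvScanF2]
  | cons c rest ih =>
    by_cases hw : c = 'w'
    · subst hw; simp [pvScanF2]
    · by_cases hu : c = 'u'
      · subst hu; simpa [pvScanF2] using ih
      · have hw' : ('w' : Char) ≠ c := fun h => hw h.symm
        simp [pvScanF2, hw, hu, hw', ih]

-- pvScanF2 from the initial state = A's find/index classification
lemma pvScanF2_spec (l : List Char) :
    pvScanF2 l false false =
      if 'w' ∈ l ∧ 'u' ∈ l then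
        (if PySem.Chars.find l ['w'] < PySem.Chars.find l ['u'] then 0 else 1)
      else if 'w' ∈ l then 2 else 3 := by
  induction l with
  | nil => simp [pvScanF2]
  | cons c rest ih =>
    by_cases hw : c = 'w'
    · subst hw
      simp only [pvScanF2, if_neg (by decide : ¬ ('w' : Char) = 'u'),
        Bool.false_eq_true, if_false]
      rw [pvScanF2_w]
      by_cases hu : 'u' ∈ rest
      · have hfu : 0 ≤ PySem.Chars.find rest ['u'] :=
          (PySem.Chars.find_nonneg_iff _ _).2 ((pvSingleton_infix_iff _ _).2 hu)
        rw [pvFind_cons 'w' 'w' rest, pvFind_cons 'u' 'w' rest]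
        simp [hu, (by decide : ¬ ('u' : Char) = 'w')]
        omega
      · have hu' : ('u' : Char) ∉ 'w' :: rest := by simp [hu]
        simp [hu, hu', List.mem_cons]
    · by_cases hu : c = 'u'
      · subst hu
        simp only [pvScanF2, if_neg (by decide : ¬ ('u' : Char) = 'w'),
          Bool.false_eq_true, if_false]
        rw [pvScanF2_u]
        by_cases hwr : 'w' ∈ rest
        · have hfw : 0 ≤ PySem.Chars.find rest ['w'] :=
            (PySem.Chars.find_nonneg_iff _ _).2 ((pvSingleton_infix_iff _ _).2 hwr)
          rw [pvFind_cons 'w' 'u' rest, pvFind_cons 'u' 'u' rest]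
          simp [hwr, (by decide : ¬ ('w' : Char) = 'u')]
          omega
        · have hw' : ('w' : Char) ∉ 'u' :: rest := by simp [hwr]
          simp [hwr, hw']
      · have hw' : ('w' : Char) ≠ c := fun h => hw h.symm
        have hu' : ('u' : Char) ≠ c := fun h => hu h.symm
        simp only [pvScanF2, if_neg hw, if_neg hu]
        rw [ih, pvFind_cons 'w' c rest, pvFind_cons 'u' c rest]
        by_cases hwr : 'w' ∈ rest <;> by_cases hur : 'u' ∈ rest
        · simp [hwr, hur, hw', hu', List.mem_cons]
        · simp [hwr, hur, hw', hu', List.mem_cons]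
        · simp [hwr, hur, hw', hu', List.mem_cons]
        · simp [hwr, hur, hw', hu', List.mem_cons]

-- A's loop body is a counter bump at pvKey x
lemma pvStep_eq (d : PySem.Dict String Int) (x : List String) :
    (if PySem.Str.find (PySem.List.pyGetD x 2 "") "d" ≠ -1 ∧
        PySem.Str.find (PySem.List.pyGetD x 2 "") "r" ≠ -1 then
       pvA_fill_f2_pattern d "dr_" x
     else if PySem.Str.find (PySem.List.pyGetD x 2 "") "c" ≠ -1 ∧
             PySem.Str.find (PySem.List.pyGetD x 2 "") "r" ≠ -1 then
       pvA_fill_f2_pattern d "cr_" x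
     else if PySem.Str.find (PySem.List.pyGetD x 2 "") "r" ≠ -1 then
       pvA_fill_f2_pattern d "r_" x
     else pvA_fill_f2_pattern d "noop_" x)
    = d.insert (pvKey x) (d.getD (pvKey x) 0 + 1) := by
  simp only [pvA_fill_f2_pattern, pvKey, PySem.Str.find_eq,
    show ("d" : String).toList = ['d'] from rfl, show ("r" : String).toList = ['r'] from rfl,
    show ("c" : String).toList = ['c'] from rfl, show ("w" : String).toList = ['w'] from rfl,
    show ("u" : String).toList = ['u'] from rfl, pvFind_mem_iff]
  split_ifs <;> rfl

lemma pvKey_mem (x : List String) : pvKey x ∈ pvAllKeys := by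
  simp only [pvKey]
  split_ifs <;> decide

-- the counter invariant of A's fold
lemma pvFold_inv (samples : List (List String)) :
    ∀ (m : String → Int),
      samples.foldl (fun d x => PySem.Dict.insert d (pvKey x) (d.getD (pvKey x) 0 + 1))
        (PySem.Dict.mk (pvAllKeys.map (fun k => (k, m k))))
      = PySem.Dict.mk (pvAllKeys.map
          (fun k => (k, m k + ((samples.map pvKey).count k : Int)))) := by
  induction samples with
  | nil => intro m; simp
  | cons s rest ih =>
    intro m
    have hmem : pvKey s ∈ pvAllKeys := pvKey_mem s
    have hnd : (PySem.Dict.mk (pvAllKeys.map (fun k => (k, m k)))).keys.Nodup := by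
      simp only [PySem.Dict.keys, List.map_map]
      simpa using (by decide : pvAllKeys.Nodup)
    have hmem' : (pvKey s, m (pvKey s)) ∈ List.map (fun k => (k, m k)) pvAllKeys :=
      List.mem_map_of_mem hmem
    have hgetD : (PySem.Dict.mk (pvAllKeys.map (fun k => (k, m k)))).getD (pvKey s) 0
        = m (pvKey s) :=
      PySem.Dict.getD_of_mem_items _ hmem' hnd 0
    have hcont : (PySem.Dict.mk (pvAllKeys.map (fun k => (k, m k)))).contains (pvKey s) = true := by
      rw [PySem.Dict.contains_iff_mem_keys]
      simp only [PySem.Dict.keys, List.map_map]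
      simpa using hmem
    have hstep : (PySem.Dict.mk (pvAllKeys.map (fun k => (k, m k)))).insert (pvKey s)
          ((PySem.Dict.mk (pvAllKeys.map (fun k => (k, m k)))).getD (pvKey s) 0 + 1)
        = PySem.Dict.mk (pvAllKeys.map
            (fun k => (k, if k = pvKey s then m k + 1 else m k))) := by
      apply PySem.Dict.ext
      rw [PySem.Dict.items_insert_of_contains _ _ hcont, hgetD]
      simp only [List.map_map]
      apply List.map_congr_left
      intro k _
      by_cases hk : k = pvKey s <;> simp [hk]
    rw [List.foldl_cons, hstep, ih]
    congr 1
    apply List.map_congr_left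
    intro k _
    by_cases hk : k = pvKey s
    · subst hk
      simp
      ring
    · simp [hk, Ne.symm hk]

-- ---- B-side lemmas ----

lemma pvSetContains (s : List Char) (a : Char) :
    (PySem.Set.contains (PySem.Set.ofList s) a = true) ↔ a ∈ s := by
  rw [PySem.Set.contains_iff, PySem.Set.mem_ofList]

lemma pvScanF2_le (l : List Char) : pvScanF2 l false false ≤ 3 := by
  rw [pvScanF2_spec]; split_ifs <;> omega

lemma pvIdxF3_le (s : String) : pvIdxF3 s ≤ 3 := by
  simp only [pvIdxF3]; split_ifs <;> omega

lemma pvSampleIdx_lt (x : List String) : pvSampleIdx x < 16 := by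
  have h1 := pvIdxF3_le (PySem.List.pyGetD x 2 "")
  have h2 := pvScanF2_le (PySem.List.pyGetD x 1 "").toList
  simp only [pvSampleIdx]; omega

-- B's flat index points at A's key
lemma pvKey_getD (x : List String) :
    pvAllKeys.getD (pvSampleIdx x) "" = pvKey x := by
  simp only [pvSampleIdx, pvKey, pvIdxF3, pvSetContains, pvScanF2_spec]
  split_ifs <;> first | rfl | (exfalso; tauto)

lemma pvAllKeys_getD_inj :
    ∀ i < 16, ∀ j < 16, pvAllKeys.getD i "" = pvAllKeys.getD j "" → i = j := by decide

lemma pvCount_map (samples : List (List String)) (K : String) :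
    (samples.map pvKey).count K = samples.countP (fun x => pvKey x == K) := by
  induction samples with
  | nil => rfl
  | cons s rest ih => simp [List.count_cons, List.countP_cons, ih]

lemma pvCountP_eq (samples : List (List String)) (k : Nat) (hk : k < 16) :
    samples.countP (fun x => pvSampleIdx x == k)
      = (samples.map pvKey).count (pvAllKeys.getD k "") := by
  rw [pvCount_map]
  apply List.countP_congr
  intro x _
  by_cases h : pvSampleIdx x = k
  · simp [h, ← pvKey_getD x]
  · have hne : ¬ pvKey x = pvAllKeys[k]?.getD "" := fun he =>
      h (pvAllKeys_getD_inj (pvSampleIdx x) (pvSampleIdx_lt x) k hk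
        ((pvKey_getD x).trans he))
    simp [h, hne]

-- B's fold over the 16-slot array, slot by slot
lemma pvB_fold (samples : List (List String)) :
    ∀ (c0 : List Int), c0.length = 16 →
      (samples.foldl pvB_step c0).length = 16 ∧
      ∀ k : Nat, k < 16 →
        PySem.List.pyGetD (samples.foldl pvB_step c0) (k : Int) 0
          = PySem.List.pyGetD c0 (k : Int) 0
            + (samples.countP (fun x => pvSampleIdx x == k) : Int) := by
  induction samples with
  | nil => intro c0 h; exact ⟨h, by intro k _; simp⟩
  | cons s rest ih =>
    intro c0 h
    have hidx := pvSampleIdx_lt s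
    have hlen1 : (pvB_step c0 s).length = 16 := by
      simp [pvB_step, h]
    obtain ⟨hl, hg⟩ := ih (pvB_step c0 s) hlen1
    refine ⟨by simpa using hl, ?_⟩
    intro k hk
    rw [List.foldl_cons, hg k hk, List.countP_cons]
    have hset : PySem.List.pyGetD (pvB_step c0 s) (k : Int) 0
        = if k = pvSampleIdx s
          then PySem.List.pyGetD c0 (pvSampleIdx s : Int) 0 + 1
          else PySem.List.pyGetD c0 (k : Int) 0 := by
      simp only [pvB_step]
      rw [PySem.List.pyGetD_pySetD_natCast c0 (pvSampleIdx s) k _ _ (by omega)]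
    rw [hset]
    by_cases hks : k = pvSampleIdx s
    · subst hks; simp; ring
    · have hbeq : (pvSampleIdx s == k) = false := by simpa using Ne.symm hks
      simp [hks, hbeq]

lemma pvB_slot (samples : List (List String)) (k : Nat) (hk : k < 16) :
    PySem.List.pyGetD (samples.foldl pvB_step (List.replicate 16 (0 : Int))) (k : Int) 0
      = (((samples.map pvKey).count (pvAllKeys.getD k "") : Nat) : Int) := by
  obtain ⟨_, hg⟩ := pvB_fold samples (List.replicate 16 (0 : Int)) (by simp)
  rw [hg k hk, pvCountP_eq samples k hk]
  have : PySem.List.pyGetD (List.replicate 16 (0 : Int)) (k : Int) 0 = 0 := by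
    interval_cases k <;> rfl
  rw [this, zero_add]

lemma pvB_output (samples : List (List String)) :
    get_count_cases_alt samples
      = pvAllKeys.map (fun k => (k, (((samples.map pvKey).count k : Nat) : Int))) := by
  simp only [get_count_cases_alt]
  norm_num [pv_f3_cases, pv_f2_cases, PySem.List.enumerate_cons, PySem.List.enumerate_nil,
    List.flatMap_cons, List.flatMap_nil, List.map_cons, List.map_nil, pvAllKeys]
  exact ⟨⟨rfl, pvB_slot samples 0 (by norm_num)⟩,
    ⟨rfl, pvB_slot samples 1 (by norm_num)⟩,
    ⟨rfl, pvB_slot samples 2 (by norm_num)⟩,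
    ⟨rfl, pvB_slot samples 3 (by norm_num)⟩,
    ⟨rfl, pvB_slot samples 4 (by norm_num)⟩,
    ⟨rfl, pvB_slot samples 5 (by norm_num)⟩,
    ⟨rfl, pvB_slot samples 6 (by norm_num)⟩,
    ⟨rfl, pvB_slot samples 7 (by norm_num)⟩,
    ⟨rfl, pvB_slot samples 8 (by norm_num)⟩,
    ⟨rfl, pvB_slot samples 9 (by norm_num)⟩,
    ⟨rfl, pvB_slot samples 10 (by norm_num)⟩,
    ⟨rfl, pvB_slot samples 11 (by norm_num)⟩,
    ⟨rfl, pvB_slot samples 12 (by norm_num)⟩,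
    ⟨rfl, pvB_slot samples 13 (by norm_num)⟩,
    ⟨rfl, pvB_slot samples 14 (by norm_num)⟩,
    ⟨rfl, pvB_slot samples 15 (by norm_num)⟩⟩

-- ===== VERDICT (by name: the statement is the Claim_ definition above) =====
theorem get_count_cases_spec : Claim_equal_get_count_cases := by
  intro samples_list _ _
  unfold Spec_get_count_cases get_count_cases
  rw [PySem.List.foldl_pyRange_zero_pyGetD samples_list []
      (fun d x =>
        if PySem.Str.find (PySem.List.pyGetD x 2 "") "d" ≠ -1 ∧
           PySem.Str.find (PySem.List.pyGetD x 2 "") "r" ≠ -1 then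
          pvA_fill_f2_pattern d "dr_" x
        else if PySem.Str.find (PySem.List.pyGetD x 2 "") "c" ≠ -1 ∧
                PySem.Str.find (PySem.List.pyGetD x 2 "") "r" ≠ -1 then
          pvA_fill_f2_pattern d "cr_" x
        else if PySem.Str.find (PySem.List.pyGetD x 2 "") "r" ≠ -1 then
          pvA_fill_f2_pattern d "r_" x
        else pvA_fill_f2_pattern d "noop_" x)]
  simp only [pvStep_eq]
  have hinit : PySem.Dict.ofList
      ((pv_f3_cases.flatMap (fun f3 => pv_f2_cases.map (fun f2 => f3 ++ "_" ++ f2))).map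
        (fun k => (k, (0 : Int))))
      = PySem.Dict.mk (pvAllKeys.map (fun k => (k, (0 : Int)))) := by decide
  rw [hinit, pvFold_inv samples_list (fun _ => 0), pvB_output samples_list]
  exact List.map_congr_left (fun k _ => by rw [zero_add])
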